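-- pv_equiv track=rewrite | github.com/posl/comment_recommendation | script/split_gen/4_time/zh/161_D/6.py | isLuckyNumber
-- ===== SOURCE A (Python) =====
-- def isLuckyNumber(n):
--     if n < 10:
--         return True
--     else:
--         while n > 9:
--             n1 = n % 10
--             n2 = n // 10 % 10
--             if abs(n1 - n2) > 1:
--                 return False
--             n = n // 10
--         return True
-- ===== SOURCE B (Python) =====
-- def isLuckyNumber(n):
--     if n < 10:
--         return True
--     s = str(n)
--     return all(abs(int(s[i]) - int(s[i + 1])) <= 1 for i in range(len(s) - 1))
-- ===== Notes on version B (the rewrite author's own statement) =====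
-- stated objective: idiomatic
-- what changed: The least-significant-first arithmetic digit-extraction while-loop is replaced by converting n to its decimal string once and checking all adjacent character pairs most-significant-first with all() over an index range.
import Mathlib
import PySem

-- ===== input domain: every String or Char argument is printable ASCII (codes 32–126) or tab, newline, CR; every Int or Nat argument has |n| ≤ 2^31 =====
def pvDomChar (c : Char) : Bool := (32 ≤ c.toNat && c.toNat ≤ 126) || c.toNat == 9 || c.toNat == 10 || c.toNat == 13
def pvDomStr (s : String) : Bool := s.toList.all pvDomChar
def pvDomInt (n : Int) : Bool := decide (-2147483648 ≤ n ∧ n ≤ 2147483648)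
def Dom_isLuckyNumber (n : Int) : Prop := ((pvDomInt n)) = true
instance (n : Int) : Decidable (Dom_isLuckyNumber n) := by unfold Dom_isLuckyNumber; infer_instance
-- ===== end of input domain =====

-- B converts n to its decimal string once and checks adjacent character pairs
-- most-significant-first, instead of A's least-significant-first arithmetic extraction loop.

-- ===== PORT A =====
-- the while-loop of A, as structural recursion on n (n // 10 shrinks while n > 9)
def luckyLoopA (n : Int) : Bool :=
  if 9 < n then
    let n1 := PySem.Int.mod n 10
    let n2 := PySem.Int.mod (PySem.Int.floordiv n 10) 10
    if 1 < (n1 - n2).natAbs then false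
    else luckyLoopA (PySem.Int.floordiv n 10)
  else true
termination_by n.toNat
decreasing_by
  simp only [PySem.Int.floordiv_eq_ediv_of_pos (by norm_num : (0:Int) < 10)]
  omega

def isLuckyNumber (n : Int) : Bool :=
  if n < 10 then true else luckyLoopA n

-- ===== PORT B =====
-- int(c) for a single decimal digit character; exact on '0'..'9', the only
-- characters str(n) contains once n ≥ 10.
def chInt (c : Char) : Int := (c.toNat : Int) - 48

def isLuckyNumber_alt (n : Int) : Bool :=
  if n < 10 then true
  else
    let s := PySem.Int.toChars n
    (PySem.List.pyRange 0 (PySem.List.len s - 1) 1).all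
      (fun i =>
        decide ((chInt (PySem.List.pyGetD s i '0') - chInt (PySem.List.pyGetD s (i + 1) '0')).natAbs ≤ 1))

-- ===== PRECONDITION & SPEC =====
def Spec_isLuckyNumber (n : Int) (out : Bool) : Prop := out = isLuckyNumber_alt n
instance (n : Int) (out : Bool) : Decidable (Spec_isLuckyNumber n out) := by unfold Spec_isLuckyNumber; infer_instance

-- ===== CLAIM (what is proved, stated in full; the proofs are below) =====
def Claim_equal_isLuckyNumber : Prop := ∀ (n : Int), Dom_isLuckyNumber n → Spec_isLuckyNumber n (isLuckyNumber n)

-- ===== LEMMAS AND PROOFS =====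

-- the adjacent-pairs check as a chain predicate on the digit-character list
def chainOK : List Char → Bool
  | a :: b :: t => (decide ((chInt a - chInt b).natAbs ≤ 1)) && chainOK (b :: t)
  | _ => true

theorem toDigitsCore_shift (b : Nat) : ∀ (f n : Nat) (l : List Char),
    Nat.toDigitsCore b f n l = Nat.toDigitsCore b f n [] ++ l := by
  intro f
  induction f with
  | zero => intro n l; simp [Nat.toDigitsCore]
  | succ f ih =>
    intro n l
    simp only [Nat.toDigitsCore]
    by_cases h : n / b = 0
    · simp [h]
    · simp only [h, if_false]
      rw [ih (n / b) (Nat.digitChar (n % b) :: l), ih (n / b) [Nat.digitChar (n % b)]]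
      simp

theorem toDigitsCore_fuel : ∀ (f₁ : Nat), ∀ (f₂ n : Nat) (l : List Char), n < f₁ → n < f₂ →
    Nat.toDigitsCore 10 f₁ n l = Nat.toDigitsCore 10 f₂ n l := by
  intro f₁
  induction f₁ with
  | zero => intro f₂ n l h1 h2; omega
  | succ f ih =>
    intro f₂ n l h1 h2
    cases f₂ with
    | zero => omega
    | succ f₂ =>
      simp only [Nat.toDigitsCore]
      by_cases h : n / 10 = 0
      · simp [h]
      · simp only [h, if_false]
        exact ih f₂ (n / 10) _ (by omega) (by omega)

theorem toDigits_lt (m : Nat) (h : m < 10) : Nat.toDigits 10 m = [Nat.digitChar m] := by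
  simp [Nat.toDigits, Nat.toDigitsCore, Nat.div_eq_of_lt h, Nat.mod_eq_of_lt h]

theorem toDigits_step (m : Nat) (h : 10 ≤ m) :
    Nat.toDigits 10 m = Nat.toDigits 10 (m / 10) ++ [Nat.digitChar (m % 10)] := by
  have hne : m / 10 ≠ 0 := by omega
  show Nat.toDigitsCore 10 (m + 1) m [] = _
  conv_lhs => rw [show m + 1 = Nat.succ m from rfl]
  simp only [Nat.toDigitsCore, hne, if_false]
  rw [toDigitsCore_shift, toDigitsCore_fuel m (m / 10 + 1) (m / 10) [] (by omega) (by omega)]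
  rfl

theorem toDigits_ne_nil (m : Nat) : Nat.toDigits 10 m ≠ [] := by
  by_cases h : m < 10
  · simp [toDigits_lt m h]
  · simp [toDigits_step m (by omega)]

theorem toDigits_getLast (m : Nat) (h : Nat.toDigits 10 m ≠ []) :
    (Nat.toDigits 10 m).getLast h = Nat.digitChar (m % 10) := by
  by_cases hm : m < 10
  · rw [List.getLast_congr h (by simp) (toDigits_lt m hm)]
    simp [Nat.mod_eq_of_lt hm]
  · rw [List.getLast_congr h (by simp) (toDigits_step m (by omega))]
    simp

theorem chainOK_append (xs : List Char) (c : Char) (h : xs ≠ []) :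
    chainOK (xs ++ [c]) =
      (chainOK xs && decide ((chInt (xs.getLast h) - chInt c).natAbs ≤ 1)) := by
  induction xs with
  | nil => exact absurd rfl h
  | cons a t ih =>
    cases t with
    | nil => simp [chainOK]
    | cons b r =>
      have ht : b :: r ≠ [] := by simp
      rw [List.getLast_cons ht]
      calc chainOK ((a :: b :: r) ++ [c])
          = (decide ((chInt a - chInt b).natAbs ≤ 1) && chainOK ((b :: r) ++ [c])) := rfl
        _ = _ := by rw [ih ht]; simp [chainOK, Bool.and_assoc]

theorem digitChar_toNat (a : Nat) (h : a < 10) : (Nat.digitChar a).toNat = 48 + a := by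
  interval_cases a <;> decide

theorem chInt_digitChar (a : Nat) (h : a < 10) : chInt (Nat.digitChar a) = (a : Int) := by
  simp [chInt, digitChar_toNat a h]

theorem luckyLoopA_eq (m : Nat) : luckyLoopA (m : Int) = chainOK (Nat.toDigits 10 m) := by
  induction m using Nat.strong_induction_on with
  | _ m ih =>
  by_cases h : m < 10
  · rw [luckyLoopA]
    simp [show ¬ (9 : Int) < (m : Int) by exact_mod_cast by omega, toDigits_lt m h, chainOK]
  · have h10 : 10 ≤ m := by omega
    rw [luckyLoopA]
    have h9 : (9 : Int) < (m : Int) := by exact_mod_cast (by omega : 9 < m)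
    simp only [h9, if_true]
    rw [toDigits_step m h10,
        chainOK_append _ _ (toDigits_ne_nil (m / 10)),
        toDigits_getLast (m / 10) (toDigits_ne_nil (m / 10))]
    have hfd : PySem.Int.floordiv (m : Int) 10 = ((m / 10 : Nat) : Int) := by
      exact_mod_cast PySem.Int.floordiv_natCast m 10
    have hmd : PySem.Int.mod (m : Int) 10 = ((m % 10 : Nat) : Int) := by
      exact_mod_cast PySem.Int.mod_natCast m 10
    have hmd2 : PySem.Int.mod (PySem.Int.floordiv (m : Int) 10) 10 = ((m / 10 % 10 : Nat) : Int) := by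
      rw [hfd]; exact_mod_cast PySem.Int.mod_natCast (m / 10) 10
    rw [hmd, hmd2, hfd, ih (m / 10) (by omega),
        chInt_digitChar (m / 10 % 10) (Nat.mod_lt _ (by omega)),
        chInt_digitChar (m % 10) (Nat.mod_lt _ (by omega))]
    by_cases hcmp : 1 < (((m % 10 : Nat) : Int) - ((m / 10 % 10 : Nat) : Int)).natAbs
    · rw [if_pos hcmp,
        decide_eq_false (show ¬ (((m / 10 % 10 : Nat) : Int) - ((m % 10 : Nat) : Int)).natAbs ≤ 1 by omega),
        Bool.and_false]
    · rw [if_neg hcmp,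
        decide_eq_true (show (((m / 10 % 10 : Nat) : Int) - ((m % 10 : Nat) : Int)).natAbs ≤ 1 by omega),
        Bool.and_true]

theorem allAdj_eq : ∀ (s : List Char),
    ((List.range (s.length - 1)).all
      (fun k => decide ((chInt (s.getD k '0') - chInt (s.getD (k + 1) '0')).natAbs ≤ 1)))
    = chainOK s := by
  intro s
  induction s with
  | nil => rfl
  | cons a t ih =>
    cases t with
    | nil => rfl
    | cons b r =>
      simp only [chainOK, ← ih]
      simp only [List.length_cons, Nat.add_sub_cancel, List.range_succ_eq_map, List.all_cons,
        List.all_map, List.getD_cons_zero, List.getD_cons_succ]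
      congr 1

theorem alt_eq_chain (n : Int) (h : ¬ n < 10) :
    isLuckyNumber_alt n = chainOK (Nat.toDigits 10 n.toNat) := by
  rw [isLuckyNumber_alt]
  simp only [h, if_false]
  have hneg : ¬ n < 0 := by omega
  have hchars : PySem.Int.toChars n = Nat.toDigits 10 n.toNat := by
    simp [PySem.Int.toChars, hneg]
  rw [hchars]
  set s := Nat.toDigits 10 n.toNat with hs
  have hlen : PySem.List.len s - 1 = ((s.length - 1 : Nat) : Int) := by
    have h1 : 1 ≤ s.length := List.length_pos_iff.mpr (toDigits_ne_nil _)
    simp only [PySem.List.len_eq]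
    omega
  rw [hlen, PySem.List.pyRange_zero_nat, List.all_map, ← allAdj_eq s]
  apply List.all_congr rfl
  intro k
  have hk1 : ((k : Int) + 1) = ((k + 1 : Nat) : Int) := by push_cast; ring
  simp only [Function.comp_apply, hk1, PySem.List.pyGetD_natCast]

-- ===== VERDICT (by name: the statement is the Claim_ definition above) =====
theorem isLuckyNumber_spec : Claim_equal_isLuckyNumber := by
  intro n _
  unfold Spec_isLuckyNumber
  by_cases h : n < 10
  · simp [isLuckyNumber, isLuckyNumber_alt, h]
  · rw [isLuckyNumber]
    simp only [h, if_false]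
    rw [alt_eq_chain n h]
    have hn : ((n.toNat : Nat) : Int) = n := Int.toNat_of_nonneg (by omega)
    conv_lhs => rw [← hn]
    rw [luckyLoopA_eq]
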